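-- pv_equiv track=rewrite | github.com/junkurihara/atcoder | python/beginner211/C-recurse.py | rcv_search
-- ===== SOURCE A (Python) =====
-- DIV = 10 ** 9 + 7
--
-- def rcv_search(idx_lists, root):
--   if len(idx_lists) == 1:
--     return len([p for p in idx_lists[0] if p > root]) % DIV
--   else:
--     total = 0
--     for p in idx_lists[0]:
--       if p > root:
--         total += rcv_search(idx_lists[1:], p) % DIV
--     return total % DIV
-- ===== SOURCE B (Python) =====
-- DIV = 10 ** 9 + 7
--
-- def _suffix(ws):
--   # suf[i] = (ws[i] + ws[i+1] + ...) % DIV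
--   suf = [0] * (len(ws) + 1)
--   for i in range(len(ws) - 1, -1, -1):
--     suf[i] = (ws[i] + suf[i + 1]) % DIV
--   return suf
--
-- def _query(vals, suf, x):
--   # vals sorted ascending: binary-search the first index with vals[lo] > x,
--   # then the suffix sum there is (sum of weights of values > x) % DIV
--   lo, hi = 0, len(vals)
--   while lo < hi:
--     mid = (lo + hi) // 2
--     if vals[mid] > x:
--       hi = mid
--     else:
--       lo = mid + 1
--   return suf[lo]
--
-- def rcv_search(idx_lists, root):
--   # Bottom-up DP from the last list to the first: each level keeps its values
--   # sorted with modular suffix sums of chain-count weights, so every lookup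
--   # "how many chains start above x" is one binary search.
--   vals = sorted(idx_lists[-1])
--   suf = _suffix([1] * len(vals))
--   for lst in reversed(idx_lists[:-1]):
--     vs = sorted(lst)
--     ws = [_query(vals, suf, v) for v in vs]
--     vals, suf = vs, _suffix(ws)
--   return _query(vals, suf, root)
-- ===== Notes on version B (the rewrite author's own statement) =====
-- stated objective: alternative
-- what changed: Replaces A's top-down recursion that re-enumerates every increasing chain (worst-case exponential in the number of lists) by a bottom-up DP that keeps each level sorted with modular suffix sums and answers each 'how many chains start above x' lookup by one binary search.
import Mathlib
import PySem

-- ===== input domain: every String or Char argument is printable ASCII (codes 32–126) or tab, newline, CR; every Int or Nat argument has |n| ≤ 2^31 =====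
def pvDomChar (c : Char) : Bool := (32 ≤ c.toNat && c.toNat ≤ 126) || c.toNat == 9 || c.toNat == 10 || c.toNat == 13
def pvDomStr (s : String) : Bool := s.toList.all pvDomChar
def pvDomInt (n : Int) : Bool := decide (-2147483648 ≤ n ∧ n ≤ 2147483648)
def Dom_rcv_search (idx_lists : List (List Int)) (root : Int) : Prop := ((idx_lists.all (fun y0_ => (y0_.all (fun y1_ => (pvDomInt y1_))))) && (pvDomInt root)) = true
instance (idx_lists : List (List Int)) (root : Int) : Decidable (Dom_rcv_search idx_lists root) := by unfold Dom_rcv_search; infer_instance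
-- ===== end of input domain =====

-- B replaces A's top-down chain enumeration by a bottom-up DP over sorted levels
-- with modular suffix sums and binary search; equivalence is about return values
-- on nonempty idx_lists (both Pythons raise IndexError on []).

def pvDIV : Int := 10 ^ 9 + 7

-- ===== PORT A =====
def rcv_search (idx_lists : List (List Int)) (root : Int) : Int :=
  match idx_lists with
  | [] => 0      -- Python raises IndexError here; excluded by Pre_
  | [l0] => ((l0.filter (fun p => p > root)).length : Int) % pvDIV
  | l0 :: l1 :: rest =>
      (l0.foldl (fun total p =>
        if p > root then total + rcv_search (l1 :: rest) p % pvDIV else total) 0) % pvDIV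
termination_by idx_lists.length
decreasing_by simp

-- ===== PORT B =====
-- _suffix(ws): suf[i] = (ws[i] + suf[i+1]) % DIV, built from the right
def pvSuffix (ws : List Int) : List Int :=
  match ws with
  | [] => [0]
  | w :: t => ((w + (pvSuffix t).headD 0) % pvDIV) :: pvSuffix t

-- the while-loop of _query: Python's vals[mid] is always in range, so getD mid 0 is exact
def pvBisect (vals : List Int) (x : Int) (lo hi : Nat) : Nat :=
  if _h : lo < hi then
    let mid := (lo + hi) / 2
    if vals.getD mid 0 > x then pvBisect vals x lo mid
    else pvBisect vals x (mid + 1) hi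
  else lo
termination_by hi - lo
decreasing_by all_goals omega

-- _query(vals, suf, x) = suf[bisect]
def pvQueryL (vals suf : List Int) (x : Int) : Int :=
  suf.getD (pvBisect vals x 0 vals.length) 0

-- one iteration of the for-loop: vs = sorted(lst); ws = queries; new state
def pvStepL (st : List Int × List Int) (lst : List Int) : List Int × List Int :=
  let vs := PySem.List.sorted lst (fun v => v)
  (vs, pvSuffix (vs.map (fun v => pvQueryL st.1 st.2 v)))

-- initial state from idx_lists[-1], then fold over reversed(idx_lists[:-1])
def pvBuild (idx_lists : List (List Int)) : List Int × List Int :=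
  let vals0 := PySem.List.sorted (idx_lists.getLast!) (fun v => v)
  (idx_lists.dropLast).reverse.foldl pvStepL (vals0, pvSuffix (List.replicate vals0.length 1))

def rcv_search_alt (idx_lists : List (List Int)) (root : Int) : Int :=
  match idx_lists with
  | [] => 0      -- Python raises IndexError here; excluded by Pre_
  | _ :: _ => pvQueryL (pvBuild idx_lists).1 (pvBuild idx_lists).2 root

-- ===== PRECONDITION & SPEC =====
-- Pre_ excludes only the empty list of lists, on which both Pythons raise IndexError.
def Pre_rcv_search (idx_lists : List (List Int)) (root : Int) : Prop := idx_lists ≠ []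
instance (idx_lists : List (List Int)) (root : Int) : Decidable (Pre_rcv_search idx_lists root) := by unfold Pre_rcv_search; infer_instance
def pvWitness_rcv_search : List (List Int) × Int := ([[1, 3], [2, 4]], 0)

def Spec_rcv_search (idx_lists : List (List Int)) (root : Int) (out : Int) : Prop := out = rcv_search_alt idx_lists root
instance (idx_lists : List (List Int)) (root : Int) (out : Int) : Decidable (Spec_rcv_search idx_lists root out) := by unfold Spec_rcv_search; infer_instance

-- ===== CLAIM (what is proved, stated in full; the proofs are below) =====
def Claim_equal_rcv_search : Prop := ∀ (idx_lists : List (List Int)) (root : Int), Dom_rcv_search idx_lists root → Pre_rcv_search idx_lists root → Spec_rcv_search idx_lists root (rcv_search idx_lists root)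

-- ===== LEMMAS AND PROOFS =====

-- A's result is already reduced mod pvDIV
theorem rcv_emod (idx_lists : List (List Int)) (root : Int) :
    rcv_search idx_lists root % pvDIV = rcv_search idx_lists root := by
  match idx_lists with
  | [] => simp [rcv_search]
  | [l0] => rw [rcv_search]; exact Int.emod_emod_of_dvd _ dvd_rfl
  | l0 :: l1 :: rest => rw [rcv_search]; exact Int.emod_emod_of_dvd _ dvd_rfl

-- A's accumulator loop as a sum over the filtered list
theorem foldl_if_eq_sum (x : Int) (f : Int → Int) (l : List Int) (a : Int) :
    l.foldl (fun t p => if p > x then t + f p else t) a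
      = a + ((l.filter (fun p => p > x)).map f).sum := by
  induction l generalizing a with
  | nil => simp
  | cons h t ih =>
      by_cases hx : h > x
      · simp [List.foldl_cons, hx, ih, add_assoc]
      · simp [List.foldl_cons, hx, ih]

-- sorted lists are monotone at getD
theorem sorted_getD_mono (vs : List Int) (hs : vs.Pairwise (· ≤ ·)) (i j : Nat)
    (hij : i ≤ j) (hj : j < vs.length) : vs.getD i 0 ≤ vs.getD j 0 := by
  rcases Nat.eq_or_lt_of_le hij with rfl | h
  · exact le_refl _
  · rw [List.getD_eq_getElem _ _ (lt_trans h hj), List.getD_eq_getElem _ _ hj]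
    exact List.pairwise_iff_getElem.mp hs i j (lt_trans h hj) hj h

-- the binary search finds a split point: everything below is ≤ x, everything at/above is > x
theorem pvBisect_inv (vs : List Int) (x : Int) (hs : vs.Pairwise (· ≤ ·)) :
    ∀ (k lo hi : Nat), hi - lo ≤ k → lo ≤ hi → hi ≤ vs.length →
      (∀ i, i < lo → vs.getD i 0 ≤ x) →
      (∀ i, hi ≤ i → i < vs.length → x < vs.getD i 0) →
      pvBisect vs x lo hi ≤ vs.length ∧
      (∀ i, i < pvBisect vs x lo hi → vs.getD i 0 ≤ x) ∧
      (∀ i, pvBisect vs x lo hi ≤ i → i < vs.length → x < vs.getD i 0) := by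
  intro k
  induction k with
  | zero =>
      intro lo hi hk hle hlen hlo hhi
      rw [pvBisect]
      have : ¬ lo < hi := by omega
      simp only [this, dite_false]
      exact ⟨by omega, hlo, by
        intro i hi1 hi2
        exact hhi i (by omega) hi2⟩
  | succ k ih =>
      intro lo hi hk hle hlen hlo hhi
      rw [pvBisect]
      by_cases hlh : lo < hi
      · simp only [hlh, dite_true]
        set mid := (lo + hi) / 2 with hmid
        have hm1 : lo ≤ mid := by omega
        have hm2 : mid < hi := by omega
        have hmlen : mid < vs.length := by omega
        by_cases hcmp : vs.getD mid 0 > x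
        · simp only [hcmp, if_true]
          exact ih lo mid (by omega) (by omega) (by omega) hlo
            (fun i hi1 hi2 => lt_of_lt_of_le hcmp (sorted_getD_mono vs hs mid i hi1 hi2))
        · simp only [hcmp, if_false]
          exact ih (mid + 1) hi (by omega) (by omega) hlen
            (fun i hi1 => le_trans
              (sorted_getD_mono vs hs i mid (by omega) hmlen) (by omega))
            hhi
      · simp only [hlh, dite_false]
        exact ⟨by omega, hlo, fun i hi1 hi2 => hhi i (by omega) hi2⟩

-- suffix sums: suf[r] = sum of ws[r:] mod DIV
theorem pvSuffix_ne_nil (ws : List Int) : pvSuffix ws ≠ [] := by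
  cases ws <;> simp [pvSuffix]

theorem pvSuffix_getD (ws : List Int) (r : Nat) (h : r ≤ ws.length) :
    (pvSuffix ws).getD r 0 = (ws.drop r).sum % pvDIV := by
  induction ws generalizing r with
  | nil =>
      have : r = 0 := by simpa using h
      subst this
      simp [pvSuffix, pvDIV]
  | cons w t ih =>
      cases r with
      | zero =>
          have hh : (pvSuffix t).headD 0 = (pvSuffix t).getD 0 0 := by
            cases hpt : pvSuffix t with
            | nil => exact absurd hpt (pvSuffix_ne_nil t)
            | cons a b => simp
          simp only [pvSuffix, List.getD_cons_zero, List.drop_zero, List.sum_cons]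
          rw [hh, ih 0 (by omega)]
          simp only [List.drop_zero, pvDIV]
          omega
      | succ r' =>
          simp only [pvSuffix, List.getD_cons_succ, List.drop_succ_cons]
          exact ih r' (by simpa using h)

-- with the split-point facts, filtering > x is dropping the first r elements
theorem filter_eq_drop (vs : List Int) (x : Int) (r : Nat) (hr : r ≤ vs.length)
    (h2 : ∀ i, i < r → vs.getD i 0 ≤ x)
    (h3 : ∀ i, r ≤ i → i < vs.length → x < vs.getD i 0) :
    vs.filter (fun v => v > x) = vs.drop r := by
  conv_lhs => rw [← List.take_append_drop r vs]
  rw [List.filter_append]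
  have h4 : (vs.take r).filter (fun v => v > x) = [] := by
    rw [List.filter_eq_nil_iff]
    intro a ha
    obtain ⟨i, hi, rfl⟩ := List.mem_iff_getElem.mp ha
    have hir : i < r := by
      have := hi; rw [List.length_take] at this; omega
    have hilen : i < vs.length := by omega
    have := h2 i hir
    rw [List.getD_eq_getElem _ _ hilen] at this
    simp only [List.getElem_take]
    simpa using this
  have h5 : (vs.drop r).filter (fun v => v > x) = vs.drop r := by
    rw [List.filter_eq_self]
    intro a ha
    obtain ⟨j, hj, rfl⟩ := List.mem_iff_getElem.mp ha
    have hjlen : r + j < vs.length := by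
      have := hj; rw [List.length_drop] at this; omega
    have := h3 (r + j) (by omega) hjlen
    rw [List.getD_eq_getElem _ _ hjlen] at this
    rw [List.getElem_drop]
    simpa using this
  rw [h4, h5, List.nil_append]

-- the query on a level built from L with weight function f computes A's filtered sum, mod DIV
theorem query_level (L : List Int) (f : Int → Int) (x : Int) :
    pvQueryL (PySem.List.sorted L (fun v => v))
      (pvSuffix ((PySem.List.sorted L (fun v => v)).map f)) x
      = ((L.filter (fun v => v > x)).map f).sum % pvDIV := by
  set vs := PySem.List.sorted L (fun v => v) with hvs
  have hs : vs.Pairwise (· ≤ ·) := PySem.List.sorted_pairwise L (fun v => v)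
  obtain ⟨hr, hlow, hhigh⟩ := pvBisect_inv vs x hs vs.length 0 vs.length
    (by omega) (by omega) (by omega) (by omega) (by omega)
  set r := pvBisect vs x 0 vs.length with hrdef
  unfold pvQueryL
  rw [← hrdef]
  rw [pvSuffix_getD _ r (by simpa using hr)]
  rw [← List.map_drop]
  rw [← filter_eq_drop vs x r hr hlow hhigh]
  have hperm : vs.Perm L := PySem.List.sorted_perm L (fun v => v) false
  congr 1
  exact ((hperm.filter _).map f).sum_eq

-- unfolding pvBuild one level
theorem pvBuild_cons (l0 l1 : List Int) (rest : List (List Int)) :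
    pvBuild (l0 :: l1 :: rest) = pvStepL (pvBuild (l1 :: rest)) l0 := by
  unfold pvBuild
  simp [List.dropLast, List.getLast!]

-- sum of constant-1 weights is the length
theorem sum_map_one (l : List Int) : (l.map (fun _ => (1 : Int))).sum = (l.length : Int) := by
  induction l with
  | nil => simp
  | cons h t ih => simp [ih]; omega

theorem main_lemma (idx_lists : List (List Int)) (x : Int) (h : idx_lists ≠ []) :
    rcv_search idx_lists x = pvQueryL (pvBuild idx_lists).1 (pvBuild idx_lists).2 x := by
  match idx_lists with
  | [] => exact absurd rfl h
  | [l0] =>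
      have hb : pvBuild [l0] = (PySem.List.sorted l0 (fun v => v),
          pvSuffix ((PySem.List.sorted l0 (fun v => v)).map (fun _ => (1 : Int)))) := by
        unfold pvBuild
        simp [List.map_const']
      rw [hb]
      simp only
      rw [query_level l0 (fun _ => (1 : Int)) x, rcv_search]
      rw [sum_map_one]
  | l0 :: l1 :: rest =>
      have ih : ∀ y, rcv_search (l1 :: rest) y
          = pvQueryL (pvBuild (l1 :: rest)).1 (pvBuild (l1 :: rest)).2 y := by
        intro y; exact main_lemma (l1 :: rest) y (by simp)
      rw [pvBuild_cons]
      unfold pvStepL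
      simp only
      have hg : (fun v => pvQueryL (pvBuild (l1 :: rest)).1 (pvBuild (l1 :: rest)).2 v)
          = fun v => rcv_search (l1 :: rest) v := funext fun v => (ih v).symm
      rw [hg, query_level l0 (fun v => rcv_search (l1 :: rest) v) x, rcv_search]
      have hfun : (fun (total : Int) (p : Int) =>
            if p > x then total + rcv_search (l1 :: rest) p % pvDIV else total)
          = (fun (total : Int) (p : Int) =>
            if p > x then total + rcv_search (l1 :: rest) p else total) := by
        funext total p
        rw [rcv_emod]
      rw [hfun, foldl_if_eq_sum, zero_add]
termination_by idx_lists.length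

-- ===== VERDICT (by name: the statement is the Claim_ definition above) =====
theorem rcv_search_spec : Claim_equal_rcv_search := by
  intro idx_lists root _ hpre
  unfold Spec_rcv_search
  match idx_lists with
  | [] => exact absurd rfl hpre
  | l :: ls =>
      rw [main_lemma (l :: ls) root (by simp)]
      rfl
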